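-- pv_equiv track=rewrite | github.com/meinzeug/beagle-os | thin-client-assistant/runtime/beagle_stream_client_host_registry.py | _find_hosts_section
-- ===== SOURCE A (Python) =====
-- def _find_hosts_section(lines: list[str]) -> tuple[int | None, int]:
--     section_start = None
--     section_end = len(lines)
--     for idx, line in enumerate(lines):
--         if line.strip() == "[hosts]":
--             section_start = idx
--             for next_idx in range(idx + 1, len(lines)):
--                 if lines[next_idx].startswith("[") and lines[next_idx].endswith("]"):
--                     section_end = next_idx
--                     break
--             break
--     return section_start, section_end
-- ===== SOURCE B (Python) =====
-- def _find_hosts_section(lines):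
--     headers = [i for i, l in enumerate(lines) if l.startswith("[") and l.endswith("]")]
--     section_start = next((i for i, l in enumerate(lines) if l.strip() == "[hosts]"), None)
--     if section_start is None:
--         return None, len(lines)
--     section_end = next((h for h in headers if h > section_start), len(lines))
--     return section_start, section_end
-- ===== Notes on version B (the rewrite author's own statement) =====
-- stated objective: alternative
-- what changed: Replaces the nested index loops with breaks by a one-pass list of all header line indices plus two find-first queries (first stripped '[hosts]' line, first header strictly after it).
import Mathlib
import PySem

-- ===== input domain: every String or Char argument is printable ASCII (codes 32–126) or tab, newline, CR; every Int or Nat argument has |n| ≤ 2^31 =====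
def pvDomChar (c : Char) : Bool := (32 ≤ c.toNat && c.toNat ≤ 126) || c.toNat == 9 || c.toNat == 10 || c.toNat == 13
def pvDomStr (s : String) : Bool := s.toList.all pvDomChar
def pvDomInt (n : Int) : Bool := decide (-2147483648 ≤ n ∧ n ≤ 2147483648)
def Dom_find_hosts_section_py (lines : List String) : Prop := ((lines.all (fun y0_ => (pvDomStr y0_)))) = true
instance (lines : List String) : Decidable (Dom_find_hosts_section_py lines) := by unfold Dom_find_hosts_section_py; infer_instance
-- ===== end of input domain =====

-- B replaces A's nested loops with breaks by a one-pass header-index list plus two find-first queries (alternative decomposition, same cost).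

-- ===== PORT A =====
-- inner loop 'for next_idx in range(idx+1, len(lines)): … break' of A
def pvAInner (lines : List String) : List Int → Option Int
  | [] => none
  | j :: rest =>
    let s := PySem.List.pyGetD lines j ""
    if PySem.Str.startswith s "[" && PySem.Str.endswith s "]" then some j
    else pvAInner lines rest

-- outer loop 'for idx, line in enumerate(lines): … break' of A
def pvAOuter (lines : List String) : List (Int × String) → Option Int × Int
  | [] => (none, (lines.length : Int))
  | (i, s) :: rest =>
    if PySem.Str.strip s == "[hosts]" then
      (some i,
        (pvAInner lines (PySem.List.pyRange (i + 1) (lines.length : Int) 1)).getD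
          (lines.length : Int))
    else pvAOuter lines rest

def find_hosts_section_py (lines : List String) : Option Int × Int :=
  pvAOuter lines (PySem.List.enumerate lines 0)

-- ===== PORT B =====
def find_hosts_section_py_alt (lines : List String) : Option Int × Int :=
  let headers :=
    ((PySem.List.enumerate lines 0).filter
      (fun p => PySem.Str.startswith p.2 "[" && PySem.Str.endswith p.2 "]")).map (·.1)
  let start :=
    ((PySem.List.enumerate lines 0).find?
      (fun p => PySem.Str.strip p.2 == "[hosts]")).map (·.1)
  match start with
  | none => (none, (lines.length : Int))
  | some st => (some st, (headers.find? (fun h => st < h)).getD (lines.length : Int))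

-- ===== PRECONDITION & SPEC =====
def Spec_find_hosts_section_py (lines : List String) (out : Option Int × Int) : Prop := out = find_hosts_section_py_alt lines
instance (lines : List String) (out : Option Int × Int) : Decidable (Spec_find_hosts_section_py lines out) := by unfold Spec_find_hosts_section_py; infer_instance

-- ===== CLAIM (what is proved, stated in full; the proofs are below) =====
def Claim_equal_find_hosts_section_py : Prop := ∀ (lines : List String), Dom_find_hosts_section_py lines → Spec_find_hosts_section_py lines (find_hosts_section_py lines)

-- ===== LEMMAS AND PROOFS =====

-- A's inner loop is List.find? of the header test over the index list
theorem pvAInner_eq_find? (lines : List String) (js : List Int) :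
    pvAInner lines js =
      js.find? (fun j =>
        PySem.Str.startswith (PySem.List.pyGetD lines j "") "[" &&
        PySem.Str.endswith (PySem.List.pyGetD lines j "") "]") := by
  induction js with
  | nil => rfl
  | cons j rest ih =>
    simp only [pvAInner, List.find?]
    cases h : (PySem.Str.startswith (PySem.List.pyGetD lines j "") "[" &&
        PySem.Str.endswith (PySem.List.pyGetD lines j "") "]") with
    | true => simp only [if_pos]
    | false => simp only [Bool.false_eq_true, if_false, ih]

theorem pv_find?_all_true {α : Type} (p : α → Bool) (l : List α)
    (h : ∀ x ∈ l, p x = true) : l.find? p = l.head? := by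
  cases l with
  | nil => rfl
  | cons x xs => rw [List.find?_cons_of_pos (h x (by simp))]; rfl

theorem pv_find?_eq_head?_filter {α : Type} (p : α → Bool) (l : List α) :
    l.find? p = (l.filter p).head? := by
  induction l with
  | nil => rfl
  | cons x xs ih =>
    cases h : p x with
    | true => rw [List.find?_cons_of_pos h, List.filter_cons_of_pos h]; rfl
    | false => rw [List.find?_cons_of_neg (by simp [h]), List.filter_cons_of_neg (by simp [h]), ih]

-- searching a tail range first-match = searching the headers of the whole range for the first one ≥ a
theorem pv_range_find?_eq (q : Int → Bool) (a n : Int) (ha : 0 ≤ a) :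
    (PySem.List.pyRange a n 1).find? q
      = ((PySem.List.pyRange 0 n 1).filter q).find? (fun h => decide (a ≤ h)) := by
  by_cases hn : n ≤ a
  · rw [PySem.List.pyRange_one_eq_nil hn, List.find?_nil]
    symm
    rw [List.find?_eq_none]
    intro x hx
    have hx' := (List.mem_filter.mp hx).1
    have h2 := (PySem.List.mem_pyRange_one.mp hx').2
    simp only [decide_eq_true_eq]
    omega
  · have hlt : a < n := by omega
    rw [PySem.List.pyRange_one_append 0 a n ha (le_of_lt hlt), List.filter_append,
      List.find?_append]
    have h1 : ((PySem.List.pyRange 0 a 1).filter q).find? (fun h => decide (a ≤ h)) = none := by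
      rw [List.find?_eq_none]
      intro x hx
      have hx' := (List.mem_filter.mp hx).1
      have h2 := (PySem.List.mem_pyRange_one.mp hx').2
      simp only [decide_eq_true_eq]
      omega
    rw [h1, Option.none_or]
    rw [pv_find?_eq_head?_filter]
    symm
    apply pv_find?_all_true
    intro x hx
    have hx' := (List.mem_filter.mp hx).1
    have h2 := (PySem.List.mem_pyRange_one.mp hx').1
    simp only [decide_eq_true_eq]
    omega

-- B's header-index list as a filter of the full index range
theorem pv_headers_eq (lines : List String) :
    ((PySem.List.enumerate lines 0).filter
        (fun p => PySem.Str.startswith p.2 "[" && PySem.Str.endswith p.2 "]")).map (·.1)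
      = (PySem.List.pyRange 0 (lines.length : Int) 1).filter
          (fun j => PySem.Str.startswith (PySem.List.pyGetD lines j "") "[" &&
                    PySem.Str.endswith (PySem.List.pyGetD lines j "") "]") := by
  rw [PySem.List.enumerate_eq_map_pyRange (d := "")]
  rw [List.filter_map, List.map_map]
  simp [Function.comp_def]

-- A's outer loop when no line strips to "[hosts]"
theorem pv_outer_none (lines : List String) :
    ∀ (xs : List String) (s : Int),
      (PySem.List.enumerate xs s).find? (fun p => PySem.Str.strip p.2 == "[hosts]") = none →
      pvAOuter lines (PySem.List.enumerate xs s) = (none, (lines.length : Int)) := by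
  intro xs
  induction xs with
  | nil => intro s _; simp [PySem.List.enumerate_nil, pvAOuter]
  | cons x xs ih =>
    intro s hf
    rw [PySem.List.enumerate_cons] at hf ⊢
    cases h : (PySem.Str.strip x == "[hosts]") with
    | true =>
      simp only [List.find?, h] at hf
      simp at hf
    | false =>
      simp only [List.find?, h] at hf
      simp only [pvAOuter, h, Bool.false_eq_true, if_false]
      exact ih (s + 1) hf

-- A's outer loop when the first stripped "[hosts]" line is found
theorem pv_outer_some (lines : List String) :
    ∀ (xs : List String) (s : Int) (p : Int × String),
      (PySem.List.enumerate xs s).find? (fun p => PySem.Str.strip p.2 == "[hosts]") = some p →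
      pvAOuter lines (PySem.List.enumerate xs s) =
        (some p.1,
          (pvAInner lines (PySem.List.pyRange (p.1 + 1) (lines.length : Int) 1)).getD
            (lines.length : Int)) := by
  intro xs
  induction xs with
  | nil => intro s p hf; simp [PySem.List.enumerate_nil] at hf
  | cons x xs ih =>
    intro s p hf
    rw [PySem.List.enumerate_cons] at hf ⊢
    cases h : (PySem.Str.strip x == "[hosts]") with
    | true =>
      simp only [List.find?, h] at hf
      obtain rfl : (s, x) = p := by injection hf
      simp only [pvAOuter, h, if_pos]
    | false =>
      simp only [List.find?, h] at hf
      simp only [pvAOuter, h, Bool.false_eq_true, if_false]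
      exact ih (s + 1) p hf

-- ===== VERDICT (by name: the statement is the Claim_ definition above) =====
theorem find_hosts_section_py_spec : Claim_equal_find_hosts_section_py := by
  intro lines _
  unfold Spec_find_hosts_section_py find_hosts_section_py find_hosts_section_py_alt
  cases hf : (PySem.List.enumerate lines 0).find?
      (fun p => PySem.Str.strip p.2 == "[hosts]") with
  | none =>
    rw [pv_outer_none lines lines 0 hf]
    simp
  | some p =>
    have hmem := List.mem_of_find?_eq_some hf
    have hfst : p.1 ∈ (PySem.List.enumerate lines 0).map (·.1) :=
      List.mem_map.mpr ⟨p, hmem, rfl⟩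
    rw [PySem.List.map_fst_enumerate] at hfst
    have hp1 : 0 ≤ p.1 := (PySem.List.mem_pyRange_one.mp hfst).1
    have hpred : (fun h : Int => decide (p.1 < h)) = (fun h : Int => decide (p.1 + 1 ≤ h)) := by
      funext h
      rw [decide_eq_decide]
      omega
    have hinner : pvAInner lines (PySem.List.pyRange (p.1 + 1) (lines.length : Int) 1)
        = (((PySem.List.enumerate lines 0).filter
            (fun q => PySem.Str.startswith q.2 "[" && PySem.Str.endswith q.2 "]")).map (·.1)).find?
            (fun h => p.1 < h) := by
      rw [pvAInner_eq_find?, pv_range_find?_eq _ _ _ (by omega), pv_headers_eq, hpred]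
    rw [pv_outer_some lines lines 0 p hf, hinner]
    simp
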